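-- pv_equiv track=rewrite | github.com/Yuuraa/Python-Algorithm | Leetcode/MAR_2021/reordered_pow2.py | reordered_power_of_2_old
-- ===== SOURCE A (Python) =====
-- def reordered_power_of_2_old(n):
--     sorted_digits = sorted(list(str(n)))
--     n_max = int(''.join(sorted_digits[::-1])) # 주어진 숫자를 이용해 만들 수 있는 최댓값
--     n_pow = 0
--
--     while n_max // 2 > 0: # 최댓값의 범위 안에 드는 2의 제곱수를 구함
--         n_max //= 2
--         n_pow += 1
--
--     for p in range(n_pow + 1):
--         if sorted(list(str((1<<p)))) == sorted_digits:
--             return True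
--
--     return False
-- ===== SOURCE B (Python) =====
-- from itertools import permutations
--
--
-- def reordered_power_of_2_old(n):
--     # Try every arrangement of n's digits (skipping leading zeros) and test
--     # whether the arranged value is a power of 2 by stripping factors of 2.
--     for perm in permutations(str(n)):
--         if perm[0] == '0':
--             continue
--         x = 0
--         for ch in perm:
--             x = 10 * x + (ord(ch) - 48)
--         while x % 2 == 0:
--             x //= 2
--         if x == 1:
--             return True
--     return False
-- ===== Notes on version B (the rewrite author's own statement) =====
-- stated objective: alternative
-- what changed: B inverts the search: instead of enumerating powers of 2 up to the max digit arrangement and comparing sorted digit strings, it enumerates the permutations of n's digits (skipping leading zeros), builds each arranged value by a Horner loop on ord(ch)-48, and tests it for being a power of 2 by stripping factors of 2.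
import Mathlib
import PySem

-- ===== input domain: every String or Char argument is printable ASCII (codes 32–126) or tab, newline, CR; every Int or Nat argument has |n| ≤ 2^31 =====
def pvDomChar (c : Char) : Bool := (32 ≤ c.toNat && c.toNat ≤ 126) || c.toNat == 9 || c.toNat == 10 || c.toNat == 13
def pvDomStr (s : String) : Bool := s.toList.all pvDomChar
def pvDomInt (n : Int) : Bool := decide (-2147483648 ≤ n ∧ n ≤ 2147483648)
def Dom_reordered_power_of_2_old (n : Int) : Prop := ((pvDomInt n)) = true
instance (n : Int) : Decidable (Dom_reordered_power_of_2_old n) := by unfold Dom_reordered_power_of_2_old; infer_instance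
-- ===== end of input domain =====

-- B inverts the search: it enumerates the digit permutations of n (skipping leading zeros),
-- builds each arranged value by a Horner loop, and strips factors of 2 to test for a power
-- of 2, instead of A's enumeration of powers of 2 compared by sorted digit strings; equal
-- values wherever A returns (A raises ValueError on negative n).


-- ===== PORT A =====
-- while n_max // 2 > 0: n_max //= 2; n_pow += 1   (fuel n_max.toNat only makes the
-- recursion structural; it bounds the number of halvings, so the loop is exact)
def pvPowLoopGo : Nat → Int → Int → Int
  | 0, _, n_pow => n_pow
  | fuel+1, n_max, n_pow =>
    if 0 < PySem.Int.floordiv n_max 2 then pvPowLoopGo fuel (PySem.Int.floordiv n_max 2) (n_pow + 1)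
    else n_pow

-- everything in A after `sorted_digits = sorted(list(str(n)))`
def pvCheck (sorted_digits : List Char) : Bool :=
  match PySem.List.slice? sorted_digits none none (-1) with  -- sorted_digits[::-1]
  | none => false                                            -- unreachable (step -1 ≠ 0)
  | some rev =>
    match PySem.Int.ofChars? rev with   -- int(''.join(...)); none = ValueError (n < 0), outside Pre_
    | none => false
    | some n_max =>
      let n_pow := pvPowLoopGo n_max.toNat n_max 0
      (PySem.List.pyRange 0 (n_pow + 1)).any (fun p =>
        PySem.List.sorted (PySem.Int.toChars ((1 : Int) <<< p.toNat)) (fun c => c) false == sorted_digits)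

def reordered_power_of_2_old (n : Int) : Bool :=
  pvCheck (PySem.List.sorted (PySem.Int.toChars n) (fun c => c) false)

-- ===== PORT B =====
-- while x % 2 == 0: x //= 2   (fuel x.natAbs only makes the recursion structural: it
-- bounds the number of halvings whenever the Python loop terminates, so the loop is exact)
def pvHalveGo : Nat → Int → Int
  | 0, x => x
  | fuel+1, x =>
    if PySem.Int.mod x 2 == 0 then pvHalveGo fuel (PySem.Int.floordiv x 2) else x

-- x = 0; for ch in perm: x = 10 * x + (ord(ch) - 48)   (ord(ch) is exactly ch.toNat)
def pvPermVal (perm : List Char) : Int :=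
  perm.foldl (fun x ch => 10 * x + ((ch.toNat : Int) - 48)) 0

def reordered_power_of_2_old_alt (n : Int) : Bool :=
  (PySem.List.permutations (PySem.Int.toChars n) (PySem.Int.toChars n).length).any (fun perm =>
    match perm with
    | [] => false                      -- unreachable: str(n) is never empty
    | c0 :: _ =>
      if c0 == '0' then false          -- continue
      else pvHalveGo (pvPermVal perm).natAbs (pvPermVal perm) == 1)

-- ===== PRECONDITION & SPEC =====
-- Pre_ excludes exactly the negative n, on which A raises ValueError
-- (int("…-") on the reversed sorted digit string that ends with the sign).
def Pre_reordered_power_of_2_old (n : Int) : Prop := 0 ≤ n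
instance (n : Int) : Decidable (Pre_reordered_power_of_2_old n) := by
  unfold Pre_reordered_power_of_2_old; infer_instance
def pvWitness_reordered_power_of_2_old : Int := 46

def Spec_reordered_power_of_2_old (n : Int) (out : Bool) : Prop := out = reordered_power_of_2_old_alt n
instance (n : Int) (out : Bool) : Decidable (Spec_reordered_power_of_2_old n out) := by
  unfold Spec_reordered_power_of_2_old; infer_instance

-- ===== CLAIM (what is proved, stated in full; the proofs are below) =====
def Claim_equal_reordered_power_of_2_old : Prop := ∀ (n : Int), Dom_reordered_power_of_2_old n → Pre_reordered_power_of_2_old n → Spec_reordered_power_of_2_old n (reordered_power_of_2_old n)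

-- ===== LEMMAS AND PROOFS =====

-- the Horner loop of B, on Nat (pvPermVal coincides with it on digit characters)
def pvValNat (perm : List Char) : Nat :=
  perm.foldl (fun x ch => 10 * x + (ch.toNat - 48)) 0

lemma pv_digitChar_toNat : ∀ k, k < 10 → (Nat.digitChar k).toNat = 48 + k := by decide

lemma pv_isDigit_bounds (ch : Char) (h : ch.isDigit = true) :
    48 ≤ ch.toNat ∧ ch.toNat ≤ 57 := by
  simp [Char.isDigit, UInt32.le_iff_toNat_le] at h
  exact ⟨h.1, h.2⟩

lemma pv_toChars_nonneg (n : Int) (h : 0 ≤ n) :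
    PySem.Int.toChars n = Nat.toDigits 10 n.toNat := by
  simp [PySem.Int.toChars, not_lt.mpr h]

lemma pv_shift (q : Nat) : (1 : Int) <<< q = ((2 ^ q : Nat) : Int) := by
  rw [Int.shiftLeft_eq]; push_cast; ring

lemma pv_len_le (m : Nat) (h : m ≤ 2147483648) : (Nat.toDigits 10 m).length ≤ 10 :=
  (Nat.length_toDigits_le_iff (by norm_num) (by norm_num)).mpr (by omega)

lemma pv_len_pow (k : Nat) (h : 34 ≤ k) : ¬ (Nat.toDigits 10 (2 ^ k)).length ≤ 10 := by
  rw [Nat.length_toDigits_le_iff (by norm_num) (by norm_num)]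
  have h1 : (10 : Nat) ^ 10 < 2 ^ 34 := by norm_num
  have h2 : (2 : Nat) ^ 34 ≤ 2 ^ k := Nat.pow_le_pow_right (by norm_num) h
  omega

set_option maxRecDepth 20000 in
lemma pv_allP : ∀ k : Nat, k < 34 →
    pvCheck (PySem.List.sorted (PySem.Int.toChars ((1 : Int) <<< k)) (fun c => c) false) = true := by
  decide

lemma pv_toDigits_ne_nil (m : Nat) : Nat.toDigits 10 m ≠ [] := by
  rw [Nat.toDigits_eq_if (by norm_num)]
  split <;> simp

-- str(m) of a positive m never starts with '0'
lemma pv_head_toDigits : ∀ m : Nat, 1 ≤ m → (Nat.toDigits 10 m).head? ≠ some '0' := by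
  intro m
  induction m using Nat.strong_induction_on with
  | _ m ih =>
    intro hm
    rw [Nat.toDigits_eq_if (by norm_num)]
    by_cases h10 : m < 10
    · rw [if_pos h10]
      intro h
      have := congrArg (fun o => (Option.map Char.toNat o)) h
      simp [pv_digitChar_toNat m h10] at this
      omega
    · rw [if_neg h10]
      rw [List.head?_append_of_ne_nil _ (pv_toDigits_ne_nil _)]
      exact ih (m / 10) (by omega) (by omega)

-- valNat (l ++ [c]) = 10 * valNat l + (c.toNat - 48)
lemma pv_valNat_snoc (l : List Char) (c : Char) :
    pvValNat (l ++ [c]) = 10 * pvValNat l + (c.toNat - 48) := by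
  simp [pvValNat, List.foldl_append]

-- the Horner loop inverts str: valNat(str(m)) = m
lemma pv_valNat_toDigits : ∀ m : Nat, pvValNat (Nat.toDigits 10 m) = m := by
  intro m
  induction m using Nat.strong_induction_on with
  | _ m ih =>
    rw [Nat.toDigits_eq_if (by norm_num)]
    by_cases h10 : m < 10
    · rw [if_pos h10]
      simp [pvValNat, pv_digitChar_toNat m h10]
    · rw [if_neg h10, pv_valNat_snoc, ih (m / 10) (by omega),
        pv_digitChar_toNat (m % 10) (by omega)]
      omega

-- on digit characters the Int Horner loop is the Nat one
lemma pv_permVal_eq_valNat (l : List Char) (h : ∀ c ∈ l, 48 ≤ c.toNat) :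
    pvPermVal l = (pvValNat l : Int) := by
  induction l using List.reverseRecOn with
  | nil => rfl
  | append_singleton l c ih =>
    have hc : 48 ≤ c.toNat := h c (by simp)
    have hl : ∀ c' ∈ l, 48 ≤ c'.toNat := fun c' hm => h c' (by simp [hm])
    rw [pv_valNat_snoc]
    simp only [pvPermVal, List.foldl_append, List.foldl_cons, List.foldl_nil]
    rw [show (l.foldl (fun x ch => 10 * x + ((ch.toNat : Int) - 48)) 0) = pvPermVal l from rfl,
      ih hl]
    push_cast [Nat.cast_sub hc]
    ring

lemma pv_char48 (c : Char) (h : 48 ≤ c.toNat ∧ c.toNat ≤ 57) (hne : c ≠ '0') :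
    1 ≤ c.toNat - 48 := by
  have : c.toNat ≠ 48 := by
    intro he
    apply hne
    have : c = Char.ofNat 48 := by rw [← he, Char.ofNat_toNat]
    simpa using this
  omega

lemma pv_valNat_pos : ∀ (l : List Char), l ≠ [] → (∀ c ∈ l, 48 ≤ c.toNat ∧ c.toNat ≤ 57) →
    l.head? ≠ some '0' → 1 ≤ pvValNat l := by
  intro l
  induction l using List.reverseRecOn with
  | nil => intro h; exact absurd rfl h
  | append_singleton l c ih =>
    intro _ hdig hhead
    rw [pv_valNat_snoc]
    cases l with
    | nil =>
      have hc := pv_char48 c (hdig c (by simp)) (by simpa using hhead)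
      simpa [pvValNat] using hc
    | cons a t =>
      have h1 : 1 ≤ pvValNat (a :: t) := by
        refine ih (by simp) (fun c' hm => hdig c' (List.mem_append_left _ hm)) ?_
        simpa using hhead
      omega

-- a digit string without leading zero is str of its value
lemma pv_toDigits_valNat : ∀ (l : List Char), l ≠ [] → (∀ c ∈ l, 48 ≤ c.toNat ∧ c.toNat ≤ 57) →
    l.head? ≠ some '0' → Nat.toDigits 10 (pvValNat l) = l := by
  intro l
  induction l using List.reverseRecOn with
  | nil => intro h; exact absurd rfl h
  | append_singleton l c ih =>
    intro _ hdig hhead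
    have hc := hdig c (by simp)
    rw [pv_valNat_snoc]
    cases l with
    | nil =>
      have h1 := pv_char48 c hc (by simpa using hhead)
      have h0 : pvValNat ([] : List Char) = 0 := rfl
      rw [Nat.toDigits_eq_if (by norm_num)]
      rw [if_pos (by omega)]
      have : Nat.digitChar (10 * pvValNat ([] : List Char) + (c.toNat - 48)) = c := by
        have he : 10 * pvValNat ([] : List Char) + (c.toNat - 48) = c.toNat - 48 := by
          simp [pvValNat]
        rw [he]
        have key : ∀ k, k < 58 → 48 ≤ k → Nat.digitChar (k - 48) = Char.ofNat k := by decide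
        rw [key c.toNat (by omega) (by omega), Char.ofNat_toNat]
      simp [this]
    | cons a t =>
      have hhead' : (a :: t).head? ≠ some '0' := by simpa using hhead
      have hdig' : ∀ c' ∈ a :: t, 48 ≤ c'.toNat ∧ c'.toNat ≤ 57 :=
        fun c' hm => hdig c' (List.mem_append_left _ hm)
      have h1 : 1 ≤ pvValNat (a :: t) := pv_valNat_pos _ (by simp) hdig' hhead'
      rw [Nat.toDigits_eq_if (by norm_num), if_neg (by omega)]
      have hdiv : (10 * pvValNat (a :: t) + (c.toNat - 48)) / 10 = pvValNat (a :: t) := by omega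
      have hmod : (10 * pvValNat (a :: t) + (c.toNat - 48)) % 10 = c.toNat - 48 := by omega
      rw [hdiv, hmod, ih (by simp) hdig' hhead']
      have key : ∀ k, k < 58 → 48 ≤ k → Nat.digitChar (k - 48) = Char.ofNat k := by decide
      rw [key c.toNat (by omega) (by omega), Char.ofNat_toNat]

lemma pv_halve_one (fuel : Nat) : pvHalveGo fuel 1 = 1 := by
  cases fuel with
  | zero => rfl
  | succ f => simp [pvHalveGo]

-- stripping factors of 2 from 2^k gives 1
lemma pv_halve_pow : ∀ (k fuel : Nat), k ≤ fuel →
    pvHalveGo fuel (((2 : Nat) ^ k : Nat) : Int) = 1 := by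
  intro k
  induction k with
  | zero => intro fuel _; simpa using pv_halve_one fuel
  | succ k ih =>
    intro fuel hk
    obtain ⟨f, rfl⟩ : ∃ f, fuel = f + 1 := ⟨fuel - 1, by omega⟩
    have hmod0 : PySem.Int.mod (((2 : Nat) ^ (k+1) : Nat) : Int) 2 = (((2 ^ (k+1)) % 2 : Nat) : Int) := by
      exact_mod_cast PySem.Int.mod_natCast (2 ^ (k+1)) 2
    have hmod : (PySem.Int.mod (((2 : Nat) ^ (k+1) : Nat) : Int) 2 == 0) = true := by
      rw [hmod0]
      simp [Nat.pow_succ, Nat.mul_mod_left]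
    have hdiv : PySem.Int.floordiv (((2 : Nat) ^ (k+1) : Nat) : Int) 2 = (((2 : Nat) ^ k : Nat) : Int) := by
      have : PySem.Int.floordiv (((2 : Nat) ^ (k+1) : Nat) : Int) 2 = (((2 ^ (k+1)) / 2 : Nat) : Int) := by
        exact_mod_cast PySem.Int.floordiv_natCast (2 ^ (k+1)) 2
      rw [this]
      norm_num [Nat.pow_succ]
    rw [pvHalveGo, hmod, if_pos rfl, hdiv]
    exact ih f (by omega)

-- if stripping factors of 2 gives 1, the number was a power of 2
lemma pv_halve_eq_one : ∀ (fuel : Nat) (x : Int), 1 ≤ x → x.toNat ≤ fuel →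
    pvHalveGo fuel x = 1 → ∃ k : Nat, x = (((2 : Nat) ^ k : Nat) : Int) := by
  intro fuel
  induction fuel with
  | zero => intro x h1 h2 _; omega
  | succ f ih =>
    intro x h1 h2 h
    rw [pvHalveGo] at h
    by_cases hm : (PySem.Int.mod x 2 == 0) = true
    · rw [if_pos hm] at h
      have hm0 : PySem.Int.mod x 2 = 0 := by simpa using hm
      have hdvd : (2 : Int) ∣ x := (PySem.Int.mod_eq_zero_iff_dvd x 2).mp hm0
      obtain ⟨c, rfl⟩ := hdvd
      have hfd : PySem.Int.floordiv (2 * c) 2 = c := by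
        rw [PySem.Int.floordiv_eq_ediv_of_pos (by omega)]
        exact Int.mul_ediv_cancel_left c (by norm_num)
      rw [hfd] at h
      obtain ⟨k, hk⟩ := ih c (by omega) (by omega) h
      exact ⟨k + 1, by push_cast [pow_succ] at hk ⊢; omega⟩
    · rw [if_neg (by simpa using hm)] at h
      exact ⟨0, by simpa using h⟩

-- every rearrangement of xs is listed by itertools.permutations(xs)
lemma pv_mem_permutations_of_perm {α : Type} [DecidableEq α] (p : List α) :
    ∀ xs : List α, p.Perm xs → p ∈ PySem.List.permutations xs xs.length := by
  induction p with
  | nil =>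
    intro xs h
    rw [List.nil_perm] at h
    subst h
    simp [PySem.List.permutations_zero]
  | cons a t ih =>
    intro xs h
    have ha : a ∈ xs := h.subset (by simp)
    have hi : xs.idxOf a < xs.length := List.idxOf_lt_length_of_mem ha
    have hget : xs[xs.idxOf a] = a := List.getElem_idxOf hi
    have herase : xs.eraseIdx (xs.idxOf a) = xs.erase a := List.eraseIdx_idxOf_eq_erase a xs
    have hlen : (xs.erase a).length + 1 = xs.length := List.length_erase_add_one ha
    have ht : t.Perm (xs.erase a) := (h.trans (List.perm_cons_erase ha)).cons_inv
    rw [← hlen, PySem.List.permutations_succ, List.mem_flatMap]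
    refine ⟨xs.idxOf a, by simp [List.mem_range]; omega, ?_⟩
    rw [List.getElem?_eq_getElem hi, hget]
    simp only [List.mem_map]
    exact ⟨t, by rw [herase]; exact ih _ ht, rfl⟩

-- the found power of 2, read as its digit string, is one of B's permutations
lemma pv_forward (n : Int)
    (h : reordered_power_of_2_old n = true) : reordered_power_of_2_old_alt n = true := by
  unfold reordered_power_of_2_old pvCheck at h
  simp only [PySem.List.slice?_none_none_neg_one] at h
  cases hv : PySem.Int.ofChars? (PySem.List.sorted (PySem.Int.toChars n) (fun c => c) false).reverse with
  | none => simp only [hv] at h; exact Bool.noConfusion h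
  | some v =>
    simp only [hv, List.any_eq_true] at h
    obtain ⟨p, _, hpred⟩ := h
    have hsorted : PySem.List.sorted (PySem.Int.toChars ((1 : Int) <<< p.toNat)) (fun c => c) false
        = PySem.List.sorted (PySem.Int.toChars n) (fun c => c) false := by
      simpa using hpred
    have hperm : (PySem.Int.toChars ((1 : Int) <<< p.toNat)).Perm (PySem.Int.toChars n) :=
      (PySem.List.sorted_id_eq_sorted_id_iff_perm _ _).mp hsorted
    have hchars : PySem.Int.toChars ((1 : Int) <<< p.toNat)
        = Nat.toDigits 10 (2 ^ p.toNat) := by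
      rw [pv_shift, pv_toChars_nonneg _ (by positivity), Int.toNat_natCast]
    simp only [reordered_power_of_2_old_alt, List.any_eq_true]
    refine ⟨PySem.Int.toChars ((1 : Int) <<< p.toNat),
      pv_mem_permutations_of_perm _ _ hperm, ?_⟩
    rw [hchars]
    have hhead := pv_head_toDigits (2 ^ p.toNat) (Nat.one_le_two_pow)
    obtain ⟨c0, rest, hcons⟩ := List.exists_cons_of_ne_nil (pv_toDigits_ne_nil (2 ^ p.toNat))
    have hc0 : (c0 == '0') = false := by
      rw [hcons] at hhead
      simpa using hhead
    have hdig : ∀ c ∈ Nat.toDigits 10 (2 ^ p.toNat), 48 ≤ c.toNat := fun c hm =>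
      (pv_isDigit_bounds c (Nat.isDigit_of_mem_toDigits (by norm_num) (by norm_num) hm)).1
    have hval : pvPermVal (Nat.toDigits 10 (2 ^ p.toNat)) = (((2 : Nat) ^ p.toNat : Nat) : Int) := by
      rw [pv_permVal_eq_valNat _ hdig, pv_valNat_toDigits]
    rw [hcons]
    simp only [hc0, Bool.if_false_left]
    rw [← hcons, hval, Int.natAbs_natCast,
      pv_halve_pow p.toNat (2 ^ p.toNat) (le_of_lt Nat.lt_two_pow_self)]
    simp

-- B's found permutation IS the digit string of a power of 2, so A's scan meets it
lemma pv_backward (n : Int) (hn : 0 < n) (hdom : n ≤ 2147483648)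
    (h : reordered_power_of_2_old_alt n = true) : reordered_power_of_2_old n = true := by
  simp only [reordered_power_of_2_old_alt, List.any_eq_true] at h
  obtain ⟨perm, hmem, hpred⟩ := h
  have hperm : perm.Perm (PySem.Int.toChars n) :=
    PySem.List.perm_of_mem_permutations hmem
  have htc : PySem.Int.toChars n = Nat.toDigits 10 n.toNat := pv_toChars_nonneg n (by omega)
  have hdig : ∀ c ∈ perm, 48 ≤ c.toNat ∧ c.toNat ≤ 57 := by
    intro c hm
    have : c ∈ Nat.toDigits 10 n.toNat := by rw [← htc]; exact hperm.subset hm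
    exact pv_isDigit_bounds c (Nat.isDigit_of_mem_toDigits (by norm_num) (by norm_num) this)
  obtain ⟨c0, rest, rfl⟩ : ∃ c0 rest, perm = c0 :: rest := by
    cases perm with
    | nil => exact Bool.noConfusion hpred
    | cons c0 rest => exact ⟨c0, rest, rfl⟩
  replace hpred : (if (c0 == '0') = true then false
      else pvHalveGo (pvPermVal (c0 :: rest)).natAbs (pvPermVal (c0 :: rest)) == 1) = true := hpred
  have hc0 : (c0 == '0') = false := by
    by_contra hb
    rw [Bool.not_eq_false] at hb
    rw [if_pos hb] at hpred
    exact Bool.noConfusion hpred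
  rw [hc0] at hpred
  simp only [Bool.false_eq_true, if_false] at hpred
  have hhead : (c0 :: rest).head? ≠ some '0' := by
    simp only [List.head?_cons, ne_eq, Option.some.injEq]
    intro he; rw [he] at hc0; simp at hc0
  have hveq : pvPermVal (c0 :: rest) = (pvValNat (c0 :: rest) : Int) :=
    pv_permVal_eq_valNat _ (fun c hm => (hdig c hm).1)
  have hpos : 1 ≤ pvValNat (c0 :: rest) := pv_valNat_pos _ (by simp) hdig hhead
  have hnabs : (pvPermVal (c0 :: rest)).natAbs = pvValNat (c0 :: rest) := by
    rw [hveq]; exact Int.natAbs_natCast _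
  rw [hnabs, hveq] at hpred
  obtain ⟨k, hk⟩ := pv_halve_eq_one (pvValNat (c0 :: rest)) ((pvValNat (c0 :: rest) : Nat) : Int) (by exact_mod_cast hpos)
    (by rw [Int.toNat_natCast]) (by simpa using hpred)
  have hvk : pvValNat (c0 :: rest) = 2 ^ k := by exact_mod_cast hk
  have hdk : Nat.toDigits 10 (2 ^ k) = c0 :: rest := by
    rw [← hvk]
    exact pv_toDigits_valNat _ (by simp) hdig hhead
  have hperm2 : (Nat.toDigits 10 (2 ^ k)).Perm (Nat.toDigits 10 n.toNat) := by
    rw [hdk, ← htc]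
    exact hperm
  have hk34 : k < 34 := by
    by_contra hk34
    exact pv_len_pow k (by omega) (hperm2.length_eq ▸ pv_len_le n.toNat (by omega))
  have hchars : PySem.Int.toChars ((1 : Int) <<< k) = Nat.toDigits 10 (2 ^ k) := by
    rw [pv_shift, pv_toChars_nonneg _ (by positivity), Int.toNat_natCast]
  have hsorted : PySem.List.sorted (PySem.Int.toChars n) (fun c => c) false
      = PySem.List.sorted (PySem.Int.toChars ((1 : Int) <<< k)) (fun c => c) false := by
    refine PySem.List.sorted_eq_sorted_of_perm _ _ _ (fun _ _ hxy => hxy) ?_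
    rw [hchars, htc]
    exact hperm2.symm
  unfold reordered_power_of_2_old
  rw [hsorted]
  exact pv_allP k hk34

-- ===== VERDICT (by name: the statement is the Claim_ definition above) =====
theorem reordered_power_of_2_old_spec : Claim_equal_reordered_power_of_2_old := by
  unfold Claim_equal_reordered_power_of_2_old
  intro n hdom hpre
  unfold Spec_reordered_power_of_2_old
  unfold Dom_reordered_power_of_2_old pvDomInt at hdom
  have hdom' : n ≤ 2147483648 := by simpa using (of_decide_eq_true hdom).2
  unfold Pre_reordered_power_of_2_old at hpre
  by_cases h0 : n = 0
  · subst h0; decide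
  · have hn : 0 < n := by omega
    cases hA : reordered_power_of_2_old n with
    | true => exact (pv_forward n hA).symm
    | false =>
      cases hB : reordered_power_of_2_old_alt n with
      | true => rw [pv_backward n hn hdom' hB] at hA; exact absurd hA (by simp)
      | false => rfl
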